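-- pv_equiv track=rewrite | github.com/ukcp-data/UKCP18_CVs | src/write_variables_from_google_sheet.py | make_dict_from_sheet
-- ===== SOURCE A (Python) =====
-- def make_dict_from_sheet(spreadsheet):
--     """
--     Group rows by variable id.
--
--     @return a dict where
--                 key = variable id
--                 value = list of matching rows
--     """
--     id_column = 0
--     data = {}
--     for row in spreadsheet:
--         if len(row) < 2:
--             continue
--
--         key = row[id_column].strip()
--         if key in data.keys():
--             data[key].append(row)
--         else:
--             data[key] = [row]
--     return data
-- ===== SOURCE B (Python) =====
-- def make_dict_from_sheet(spreadsheet):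
--     """
--     Group rows by variable id.
--
--     @return a dict where
--                 key = variable id
--                 value = list of matching rows
--     """
--     rows = [row for row in spreadsheet if len(row) >= 2]
--     keys = []
--     for row in rows:
--         k = row[0].strip()
--         if k not in keys:
--             keys.append(k)
--     return {k: [row for row in rows if row[0].strip() == k] for k in keys}
-- ===== Notes on version B (the rewrite author's own statement) =====
-- stated objective: alternative
-- what changed: Replaces the single-pass hash-accumulation (dict lookup + append/insert per row) by a two-phase plan: first collect the distinct stripped ids in first-occurrence order, then build the result with one filtering comprehension per id.
import Mathlib
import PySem

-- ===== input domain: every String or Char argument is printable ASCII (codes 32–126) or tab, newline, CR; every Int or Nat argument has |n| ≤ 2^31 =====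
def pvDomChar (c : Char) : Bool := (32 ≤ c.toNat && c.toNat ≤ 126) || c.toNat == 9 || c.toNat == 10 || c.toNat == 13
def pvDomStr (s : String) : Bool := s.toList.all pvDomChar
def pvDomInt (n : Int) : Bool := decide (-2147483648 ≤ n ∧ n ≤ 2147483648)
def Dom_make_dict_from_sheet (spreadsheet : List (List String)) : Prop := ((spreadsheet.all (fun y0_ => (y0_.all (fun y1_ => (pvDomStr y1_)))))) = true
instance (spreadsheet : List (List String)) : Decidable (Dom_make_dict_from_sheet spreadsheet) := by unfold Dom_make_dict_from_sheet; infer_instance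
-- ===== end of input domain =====

-- B replaces A's per-row dict accumulation by 'collect distinct keys, then one filter per key';
-- an alternative decomposition with the same return value (no speed claim).

-- ===== PORT A =====
-- key = row[0].strip()  (row[0] is reached only under len(row) >= 2, so the default is never used)
def pvKey (row : List String) : String := PySem.Str.strip (PySem.List.pyGetD row 0 "")

def make_dict_from_sheet (spreadsheet : List (List String)) : List (String × List (List String)) :=
  (spreadsheet.foldl (fun data row =>
      if row.length < 2 then data                -- continue
      else
        let key := pvKey row
        if data.contains key then
          data.modify key [] (· ++ [row])        -- data[key].append(row)
        else
          data.insert key [row]) PySem.Dict.empty).items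

-- ===== PORT B =====
def make_dict_from_sheet_alt (spreadsheet : List (List String)) : List (String × List (List String)) :=
  let rows := spreadsheet.filter (fun row => 2 ≤ row.length)
  let keys : PySem.Set String :=
    rows.foldl (fun s row => PySem.Set.add s (pvKey row)) PySem.Set.empty
  keys.map (fun k => (k, rows.filter (fun row => pvKey row == k)))

-- ===== PRECONDITION & SPEC =====
def Spec_make_dict_from_sheet (spreadsheet : List (List String)) (out : List (String × List (List String))) : Prop := out = make_dict_from_sheet_alt spreadsheet
instance (spreadsheet : List (List String)) (out : List (String × List (List String))) : Decidable (Spec_make_dict_from_sheet spreadsheet out) := by unfold Spec_make_dict_from_sheet; infer_instance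

-- ===== CLAIM (what is proved, stated in full; the proofs are below) =====
def Claim_equal_make_dict_from_sheet : Prop := ∀ (spreadsheet : List (List String)), Dom_make_dict_from_sheet spreadsheet → Spec_make_dict_from_sheet spreadsheet (make_dict_from_sheet spreadsheet)

-- ===== LEMMAS AND PROOFS =====

-- A's two branches are one 'modify': on an absent key, modify k [] (· ++ [row]) inserts [] ++ [row] = [row].
theorem pvStep_eq_modify (d : PySem.Dict String (List (List String))) (row : List String) :
    (if d.contains (pvKey row) then d.modify (pvKey row) [] (· ++ [row])
     else d.insert (pvKey row) [row]) = d.modify (pvKey row) [] (· ++ [row]) := by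
  by_cases h : d.contains (pvKey row)
  · simp [h]
  · simp only [Bool.not_eq_true] at h
    simp [h, PySem.Dict.modify, PySem.Dict.getD_of_not_contains]

theorem make_dict_from_sheet_eq (sp : List (List String)) :
    make_dict_from_sheet sp = make_dict_from_sheet_alt sp := by
  unfold make_dict_from_sheet make_dict_from_sheet_alt
  dsimp only
  -- A's loop skips short rows: it is a fold over the filtered rows, and by pvStep_eq_modify each step is a 'modify'
  have h1 : (sp.foldl (fun data row =>
      if row.length < 2 then data
      else
        let key := pvKey row
        if data.contains key then data.modify key [] (· ++ [row])
        else data.insert key [row]) PySem.Dict.empty)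
      = (sp.filter (fun row => 2 ≤ row.length)).foldl
          (fun d row => d.modify (pvKey row) [] (· ++ [row])) PySem.Dict.empty := by
    rw [List.foldl_filter]
    congr 1
    funext d row
    by_cases h : row.length < 2
    · simp [h, Nat.not_le.mpr h]
    · simp only [h]
      simp [Nat.le_of_not_lt h, pvStep_eq_modify]
  rw [h1]
  set rows := sp.filter (fun row => 2 ≤ row.length) with hrows
  -- rewrite A's fold over rows as a fold over (key, row) pairs
  have h2 : rows.foldl (fun d row => d.modify (pvKey row) [] (· ++ [row])) PySem.Dict.empty
      = (rows.map (fun r => (pvKey r, r))).foldl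
          (fun d p => d.modify p.1 [] (· ++ [p.2])) PySem.Dict.empty := by
    rw [List.foldl_map]
  rw [h2]
  set l := rows.map (fun r => (pvKey r, r)) with hl
  -- the dict's keys are the distinct keys in first-occurrence order
  have hkeys : (l.foldl (fun d p => d.modify p.1 [] (· ++ [p.2])) PySem.Dict.empty).keys
      = PySem.Set.ofList (rows.map pvKey) := by
    rw [PySem.Dict.keys_foldl_modify_key l Prod.fst]
    simp [hl, List.map_map, PySem.Set.update_nil_left, Function.comp_def]
  have hnd : (l.foldl (fun d p => d.modify p.1 [] (· ++ [p.2])) PySem.Dict.empty).keys.Nodup := by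
    apply PySem.Dict.nodup_keys_foldl_modify_key
    simp
  rw [PySem.Dict.items_eq_map_keys _ hnd []]
  -- B's key-collecting loop builds the same distinct-key list
  have hB : rows.foldl (fun s row => PySem.Set.add s (pvKey row)) PySem.Set.empty
      = PySem.Set.ofList (rows.map pvKey) := by
    rw [← PySem.Set.update_map_eq_foldl_add]
    simp [PySem.Set.update_nil_left]
  rw [hkeys, hB]
  apply List.map_congr_left
  intro k hk
  -- per key, the accumulated group is exactly the filtered rows
  have hg : (l.foldl (fun d p => d.modify p.1 [] (· ++ [p.2])) PySem.Dict.empty).getD k []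
      = rows.filter (fun row => pvKey row == k) := by
    rw [PySem.Dict.getD_foldl_modify_append]
    simp [hl, List.filter_map, Function.comp_def, List.map_map]
  rw [hg]

-- ===== VERDICT (by name: the statement is the Claim_ definition above) =====
theorem make_dict_from_sheet_spec : Claim_equal_make_dict_from_sheet := by
  intro sp _
  unfold Spec_make_dict_from_sheet
  exact make_dict_from_sheet_eq sp
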